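-- pv_equiv track=rewrite | github.com/pypi-data/pypi-mirror-401 | packages/pdftl/pdftl-0.7.0-py3-none-any.whl/pdftl/utils/string.py | xml_decode_for_info
-- ===== SOURCE A (Python) =====
-- XML_LOOKUPS = {
--     "&": "&amp;",
--     "'": "&apos;",
--     '"': "&quot;",
--     "<": "&lt;",
--     ">": "&gt;",
-- }
--
-- def _xml_decode_lookup_step(x):
--     """
--     If x starts with an encoded lookup string, decode it.
--
--     Returns:
--     x', y
--     where x' is x with any leading encoded lookup removed,
--     and y is the decoded version of that encoded lookup, or None
--     """
--     for k, v in XML_LOOKUPS.items():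
--         if x.startswith(v):
--             return x[len(v) :], k
--     return x, None
--
-- def xml_decode_for_info(x):
--     """
--     Reverse the encoding of xml_encode_for_info()
--     """
--     out = ""
--     while len(x) > 0:
--         x, y = _xml_decode_lookup_step(x)
--         if y is not None:
--             out += y
--             continue
--
--         if x.startswith("&#") and ";" in x:
--             code, x = x[2:].split(";", 1)
--             out += chr(int(code))
--             continue
--
--         out += x[0]
--         x = x[1:]
--
--     return out
-- ===== SOURCE B (Python) =====
-- XML_LOOKUPS = {
--     "&": "&amp;",
--     "'": "&apos;",
--     '"': "&quot;",
--     "<": "&lt;",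
--     ">": "&gt;",
-- }
--
-- # B: split once on '&' and decode each part by its prefix, instead of A's
-- # character-by-character front-consuming loop.
-- _ENTITY_SUFFIXES = [(v[1:], k) for k, v in XML_LOOKUPS.items()]
--
-- def _decode_part(p):
--     """Decode '&' + p (p contains no '&')."""
--     for suf, ch in _ENTITY_SUFFIXES:
--         if p.startswith(suf):
--             return ch + p[len(suf):]
--     if p.startswith("#") and ";" in p:
--         code, rest = p[1:].split(";", 1)
--         return chr(int(code)) + rest
--     return "&" + p
--
-- def xml_decode_for_info(x):
--     """
--     Reverse the encoding of xml_encode_for_info()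
--     """
--     first, *parts = x.split("&")
--     return first + "".join(map(_decode_part, parts))
-- ===== Notes on version B (the rewrite author's own statement) =====
-- stated objective: faster
-- what changed: B splits the input once on '&' and decodes each part by its leading suffix (entity tail, numeric code, or literal), instead of A's character-by-character front-consuming while-loop that re-tests five startswith prefixes and repeatedly slices the remaining string.
import Mathlib
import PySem

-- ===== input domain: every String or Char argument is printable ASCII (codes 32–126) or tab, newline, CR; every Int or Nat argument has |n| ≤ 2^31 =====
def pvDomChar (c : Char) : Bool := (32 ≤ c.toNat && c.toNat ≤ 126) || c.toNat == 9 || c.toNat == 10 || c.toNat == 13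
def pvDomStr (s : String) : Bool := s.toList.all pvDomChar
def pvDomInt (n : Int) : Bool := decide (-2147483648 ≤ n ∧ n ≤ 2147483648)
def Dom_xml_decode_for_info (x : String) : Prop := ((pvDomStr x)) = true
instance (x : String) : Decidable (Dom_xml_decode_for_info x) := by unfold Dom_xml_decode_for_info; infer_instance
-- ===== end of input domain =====

-- B splits the input once on '&' and decodes each part by its leading suffix instead of
-- A's character-by-character front-consuming loop; measurably faster in Python.


-- shared port of the built-in chr(n): Python raises ValueError outside [0, 0x110000),
-- and the surrogates U+D800–DFFF are not representable as a Lean Char; both are outside Pre_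
def pvChr (n : Int) : List Char :=
  if (0 ≤ n ∧ n < 55296) ∨ (57344 ≤ n ∧ n < 1114112) then [Char.ofNat n.toNat] else []

-- ===== PORT A =====
-- XML_LOOKUPS (a dict: association list in insertion order)
def pvXmlLookups : List (List Char × List Char) :=
  [(['&'], ['&','a','m','p',';']),
   (['\''], ['&','a','p','o','s',';']),
   (['"'], ['&','q','u','o','t',';']),
   (['<'], ['&','l','t',';']),
   (['>'], ['&','g','t',';'])]

-- _xml_decode_lookup_step: the for-loop over XML_LOOKUPS.items()
def pvLookupStep : List (List Char × List Char) → List Char → List Char × Option (List Char)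
  | [], x => (x, none)
  | (k, v) :: rest, x =>
      if PySem.Chars.startswith x v then (x.drop v.length, some k) else pvLookupStep rest x

theorem pvLookupStep_none_eq : ∀ (L : List (List Char × List Char)) (x x1 : List Char),
    pvLookupStep L x = (x1, none) → x1 = x := by
  intro L
  induction L with
  | nil => intro x x1 h; simpa [pvLookupStep] using (congrArg Prod.fst h).symm
  | cons p rest ih =>
      intro x x1 h
      simp only [pvLookupStep] at h
      split at h
      · cases h
      · exact ih x x1 h

theorem pvLookupStep_some_lt : ∀ (L : List (List Char × List Char)) (x x1 y : List Char),
    (∀ p ∈ L, p.2 ≠ []) → pvLookupStep L x = (x1, some y) → x1.length < x.length := by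
  intro L
  induction L with
  | nil => intro x x1 y _ h; simp [pvLookupStep] at h
  | cons p rest ih =>
      intro x x1 y hne h
      simp only [pvLookupStep] at h
      split at h
      · rename_i hpre
        obtain ⟨h1, -⟩ := Prod.mk.injEq .. ▸ h
        subst h1
        have hpfx : p.2 <+: x := by
          simpa [PySem.Chars.startswith, List.isPrefixOf_iff_prefix] using hpre
        have hlen : p.2.length ≤ x.length := hpfx.length_le
        have hp2 : p.2 ≠ [] := hne p (by simp)
        have : 0 < p.2.length := List.length_pos_iff.mpr hp2
        simp only [List.length_drop]
        omega
      · exact ih x x1 y (fun q hq => hne q (by simp [hq])) h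

-- xml_decode_for_info: the while-loop, one recursive call per iteration.
-- x[2:].split(';', 1) is ported by hand as (take up to the first ';', rest after it):
-- exact here because the guard '";" in x' ensures a ';' is present.
def pvDecodeA (x : List Char) : List Char :=
  match x with
  | [] => []
  | c :: r =>
    match hs : pvLookupStep pvXmlLookups (c :: r) with
    | (x1, some y) => y ++ pvDecodeA x1
    | (x1, none) =>
      if PySem.Chars.startswith x1 ['&', '#'] && PySem.Chars.isIn [';'] x1 then
        let code := (x1.drop 2).takeWhile (fun ch => ch ≠ ';')
        let rest := ((x1.drop 2).dropWhile (fun ch => ch ≠ ';')).drop 1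
        match PySem.Int.ofChars? code with
        | some n => pvChr n ++ pvDecodeA rest
        | none => []  -- int(code) raises ValueError: outside Pre_
      else
        match x1 with
        | c1 :: r1 => c1 :: pvDecodeA r1
        | [] => []  -- unreachable: x1 = c :: r here
  termination_by x.length
  decreasing_by
  · exact pvLookupStep_some_lt pvXmlLookups (c :: r) x1 y (by decide) hs
  · have hx1 : x1 = c :: r := pvLookupStep_none_eq _ _ _ hs
    have h1 : ((x1.drop 2).dropWhile (fun ch => ch ≠ ';')).length ≤ (x1.drop 2).length :=
      List.length_dropWhile_le _ _
    simp only [List.length_drop] at h1 ⊢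
    subst hx1
    simp only [List.length_cons] at *
    omega
  · have hx1 : c1 :: r1 = c :: r := pvLookupStep_none_eq pvXmlLookups (c :: r) (c1 :: r1) hs
    cases hx1
    simp

def xml_decode_for_info (x : String) : String := String.mk (pvDecodeA x.toList)

-- ===== PORT B =====
-- XML_LOOKUPS again (B's module constant), and _ENTITY_SUFFIXES = [(v[1:], k) …]
def pvXmlLookupsB : List (List Char × List Char) :=
  [(['&'], ['&','a','m','p',';']),
   (['\''], ['&','a','p','o','s',';']),
   (['"'], ['&','q','u','o','t',';']),
   (['<'], ['&','l','t',';']),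
   (['>'], ['&','g','t',';'])]

def pvEntitySuffixes : List (List Char × List Char) :=
  pvXmlLookupsB.map (fun kv => (kv.2.drop 1, kv.1))

-- the for-loop in _decode_part (early return on the first matching suffix)
def pvFindSuffix : List (List Char × List Char) → List Char → Option (List Char)
  | [], _ => none
  | (suf, ch) :: rest, p =>
      if PySem.Chars.startswith p suf then some (ch ++ p.drop suf.length)
      else pvFindSuffix rest p

-- _decode_part; p[1:].split(';', 1) ported as for A (exact: the guard ensures ';' ∈ p)
def pvDecodePart (p : List Char) : List Char :=
  match pvFindSuffix pvEntitySuffixes p with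
  | some r => r
  | none =>
    if PySem.Chars.startswith p ['#'] && PySem.Chars.isIn [';'] p then
      let code := (p.drop 1).takeWhile (fun ch => ch ≠ ';')
      let rest := ((p.drop 1).dropWhile (fun ch => ch ≠ ';')).drop 1
      match PySem.Int.ofChars? code with
      | some n => pvChr n ++ rest
      | none => []  -- int(code) raises ValueError: outside Pre_
    else '&' :: p

def xml_decode_for_info_alt (x : String) : String :=
  match PySem.Chars.splitOn x.toList ['&'] with
  | first :: parts => String.mk (first ++ PySem.Chars.join [] (parts.map pvDecodePart))
  | [] => ""  -- unreachable: str.split always returns at least one piece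

-- ===== PRECONDITION & SPEC =====
def pvCodeOK (code : List Char) : Bool :=
  match PySem.Int.ofChars? code with
  | some n => decide ((0 ≤ n ∧ n < 55296) ∨ (57344 ≤ n ∧ n < 1114112))
  | none => false

def pvPreAt : List Char → Bool
  | '&' :: '#' :: t =>
      !(t.contains ';') ||
        (!((t.takeWhile (fun ch => ch ≠ ';')).contains '&') &&
          pvCodeOK (t.takeWhile (fun ch => ch ≠ ';')))
  | _ => true

-- Pre_ excludes exactly the inputs where a numeric entity '&#…;' makes A raise
-- (int() ValueError on a malformed code — in particular a code cut by a later '&' —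
-- or chr() ValueError out of range) and the codes U+D800–DFFF, whose surrogate result
-- is not representable as a Lean Char.
def Pre_xml_decode_for_info (x : String) : Prop :=
  ∀ i ∈ List.range x.toList.length, pvPreAt (x.toList.drop i) = true
instance (x : String) : Decidable (Pre_xml_decode_for_info x) := by
  unfold Pre_xml_decode_for_info; infer_instance

def pvWitness_xml_decode_for_info : String := "a&amp; &#65;&lt;b&gt;&&quot;"

def Spec_xml_decode_for_info (x : String) (out : String) : Prop := out = xml_decode_for_info_alt x
instance (x : String) (out : String) : Decidable (Spec_xml_decode_for_info x out) := by
  unfold Spec_xml_decode_for_info; infer_instance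

-- ===== CLAIM (what is proved, stated in full; the proofs are below) =====
def Claim_equal_xml_decode_for_info : Prop :=
  ∀ (x : String), Dom_xml_decode_for_info x → Pre_xml_decode_for_info x →
    Spec_xml_decode_for_info x (xml_decode_for_info x)

-- ===== LEMMAS AND PROOFS =====

-- B's split, characterised structurally
def pvMySplit : List Char → List (List Char)
  | [] => [[]]
  | c :: r =>
      if c = '&' then [] :: pvMySplit r
      else
        match pvMySplit r with
        | p :: ps => (c :: p) :: ps
        | [] => [[]]

theorem pvMySplit_ne_nil (cs : List Char) : pvMySplit cs ≠ [] := by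
  cases cs with
  | nil => simp [pvMySplit]
  | cons c r =>
      simp only [pvMySplit]
      split
      · simp
      · split <;> simp

theorem pvMySplit_cons_shape (cs : List Char) : ∃ p ps, pvMySplit cs = p :: ps := by
  cases h : pvMySplit cs with
  | nil => exact absurd h (pvMySplit_ne_nil cs)
  | cons p ps => exact ⟨p, ps, rfl⟩

theorem pvSplitOn_go_eq : ∀ (fuel : Nat) (l : List Char), l.length < fuel →
    ∀ (cur : List Char) (acc : List (List Char)),
      PySem.Chars.splitOn.go ['&'] fuel l cur acc =
        acc.reverse ++
          (match pvMySplit l with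
           | p :: ps => (cur.reverse ++ p) :: ps
           | [] => []) := by
  intro fuel
  induction fuel with
  | zero => intro l h; omega
  | succ fuel ih =>
      intro l h cur acc
      match l with
      | [] => rw [PySem.Chars.splitOn.go.eq_def]; simp [pvMySplit]
      | c :: rest =>
          obtain ⟨p, ps, hm⟩ := pvMySplit_cons_shape rest
          rw [PySem.Chars.splitOn.go.eq_def]
          by_cases hc : c = '&'
          · subst hc
            simp only [List.isPrefixOf]
            rw [if_pos (by decide)]
            simp only [List.length_cons, List.length_nil, List.drop_succ_cons, List.drop_zero]
            rw [ih rest (by simpa using h) [] (List.reverse cur :: acc)]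
            simp [pvMySplit, hm]
          · simp only [List.isPrefixOf]
            rw [if_neg (by simp [Ne.symm hc])]
            rw [ih rest (by simpa using h) (c :: cur) acc]
            simp [pvMySplit, hm, hc]

theorem pvSplitOn_eq (cs : List Char) : PySem.Chars.splitOn cs ['&'] = pvMySplit cs := by
  obtain ⟨p, ps, hm⟩ := pvMySplit_cons_shape cs
  rw [PySem.Chars.splitOn]
  rw [pvSplitOn_go_eq (cs.length + 1) cs (by omega) [] []]
  simp [hm]

theorem pvMySplit_head (r : List Char) :
    pvMySplit r = (r.takeWhile (fun c => c ≠ '&')) :: (pvMySplit r).tail := by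
  induction r with
  | nil => simp [pvMySplit]
  | cons c rest ih =>
      by_cases hc : c = '&'
      · subst hc; simp [pvMySplit, List.takeWhile]
      · obtain ⟨p, ps, hm⟩ := pvMySplit_cons_shape rest
        simp only [pvMySplit, if_neg hc, hm, List.takeWhile]
        rw [hm] at ih
        simp only [List.tail] at ih
        cases ih
        simp [hc]

theorem pvMySplit_append {a : List Char} (u : List Char) (h : '&' ∉ a) :
    pvMySplit (a ++ u) = (a ++ (pvMySplit u).headD []) :: (pvMySplit u).tail := by
  induction a with
  | nil =>
      obtain ⟨p, ps, hm⟩ := pvMySplit_cons_shape u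
      simp [hm]
  | cons c a ih =>
      have hc : c ≠ '&' := by intro hh; exact h (by simp [hh])
      have ih' := ih (by intro hh; exact h (by simp [hh]))
      obtain ⟨p, ps, hm⟩ := pvMySplit_cons_shape u
      simp only [List.cons_append, pvMySplit, if_neg hc, ih']

theorem pvPrefix_takeWhile_iff (suf r : List Char) (h : '&' ∉ suf) :
    List.isPrefixOf suf (r.takeWhile (fun c => c ≠ '&')) = List.isPrefixOf suf r := by
  induction suf generalizing r with
  | nil => simp [List.isPrefixOf]
  | cons s ss ih =>
      have hs : s ≠ '&' := by intro hh; exact h (by simp [hh])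
      match r with
      | [] => simp [List.takeWhile]
      | c :: rr =>
          by_cases hc : c = '&'
          · subst hc
            simp [List.takeWhile, List.isPrefixOf, fun hh => hs hh]
          · have hd : (decide (c ≠ '&')) = true := by simp [hc]
            simp only [List.takeWhile, hd, List.isPrefixOf]
            rw [ih rr (by intro hh; exact h (by simp [hh]))]

-- bexp: what B computes, on the list level
def pvBexp (cs : List Char) : List Char :=
  match pvMySplit cs with
  | p :: ps => p ++ (ps.map pvDecodePart).flatten
  | [] => []

def pvPreL (cs : List Char) : Prop := ∀ i : Nat, pvPreAt (cs.drop i) = true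

theorem pvPreL_drop {cs : List Char} (h : pvPreL cs) (k : Nat) : pvPreL (cs.drop k) := by
  intro i; rw [List.drop_drop, Nat.add_comm]; exact h (i + k)

theorem pvLookupStep_amp (r : List Char) :
    pvLookupStep pvXmlLookups ('&' :: r) =
      if List.isPrefixOf ['a','m','p',';'] r then (r.drop 4, some ['&'])
      else if List.isPrefixOf ['a','p','o','s',';'] r then (r.drop 5, some ['\''])
      else if List.isPrefixOf ['q','u','o','t',';'] r then (r.drop 5, some ['"'])
      else if List.isPrefixOf ['l','t',';'] r then (r.drop 3, some ['<'])
      else if List.isPrefixOf ['g','t',';'] r then (r.drop 3, some ['>'])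
      else ('&' :: r, none) := by
  simp only [pvLookupStep, pvXmlLookups, PySem.Chars.startswith, List.isPrefixOf,
    beq_self_eq_true, Bool.true_and, List.drop_succ_cons, List.length_cons, List.length_nil,
    List.drop_zero]

theorem pvFindSuffix_eval (p : List Char) :
    pvFindSuffix pvEntitySuffixes p =
      if List.isPrefixOf ['a','m','p',';'] p then some ('&' :: p.drop 4)
      else if List.isPrefixOf ['a','p','o','s',';'] p then some ('\'' :: p.drop 5)
      else if List.isPrefixOf ['q','u','o','t',';'] p then some ('"' :: p.drop 5)
      else if List.isPrefixOf ['l','t',';'] p then some ('<' :: p.drop 3)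
      else if List.isPrefixOf ['g','t',';'] p then some ('>' :: p.drop 3)
      else none := by
  simp only [pvEntitySuffixes, pvXmlLookupsB, List.map, List.drop_succ_cons, List.drop_zero,
    pvFindSuffix, PySem.Chars.startswith, List.length_cons, List.length_nil]
  norm_num

theorem pvIsIn_singleton (c : Char) (s : List Char) : PySem.Chars.isIn [c] s = true ↔ c ∈ s := by
  rw [PySem.Chars.isIn_iff_infix]; exact List.singleton_infix_iff c s

theorem pvSemiSplit : ∀ (t : List Char), ';' ∈ t →
    t = t.takeWhile (fun c => c ≠ ';') ++ ';' :: ((t.dropWhile (fun c => c ≠ ';')).drop 1) := by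
  intro t h
  induction t with
  | nil => cases h
  | cons c tt iht =>
      by_cases hc : c = ';'
      · subst hc
        simp [List.takeWhile, List.dropWhile]
      · have hm : ';' ∈ tt := by
          rcases List.mem_cons.mp h with h1 | h1
          · exact absurd h1.symm hc
          · exact h1
        have hd : (decide (c ≠ ';')) = true := by simp [hc]
        simp only [List.takeWhile, List.dropWhile, hd, List.cons_append]
        exact congrArg (c :: ·) (iht hm)

theorem pvDecodeA_some {c : Char} {r x1 y : List Char}
    (hs : pvLookupStep pvXmlLookups (c :: r) = (x1, some y)) :
    pvDecodeA (c :: r) = y ++ pvDecodeA x1 := by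
  rw [pvDecodeA.eq_def]
  split
  · rename_i heq
    exact absurd heq (List.cons_ne_nil _ _)
  · rename_i c2 r2 heq
    injection heq with e1 e2
    subst e1; subst e2
    split
    · rename_i heq
      rw [hs] at heq
      obtain ⟨h1, h2⟩ := Prod.mk.injEq .. ▸ heq
      cases h1
      injection h2 with h3
      cases h3
      rfl
    · rename_i heq
      rw [hs] at heq
      obtain ⟨-, h2⟩ := Prod.mk.injEq .. ▸ heq
      cases h2

theorem pvDecodeA_num {c : Char} {r x1 : List Char}
    (hs : pvLookupStep pvXmlLookups (c :: r) = (x1, none))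
    (hg : (PySem.Chars.startswith x1 ['&', '#'] && PySem.Chars.isIn [';'] x1) = true) :
    pvDecodeA (c :: r) =
      (match PySem.Int.ofChars? ((x1.drop 2).takeWhile (fun ch => ch ≠ ';')) with
       | some n => pvChr n ++ pvDecodeA (((x1.drop 2).dropWhile (fun ch => ch ≠ ';')).drop 1)
       | none => []) := by
  rw [pvDecodeA.eq_def]
  split
  · rename_i heq
    exact absurd heq (List.cons_ne_nil _ _)
  · rename_i c2 r2 heq
    injection heq with e1 e2
    subst e1; subst e2
    split
    · rename_i heq
      rw [hs] at heq
      obtain ⟨-, h2⟩ := Prod.mk.injEq .. ▸ heq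
      cases h2
    · rename_i heq
      rw [hs] at heq
      obtain ⟨h1, -⟩ := Prod.mk.injEq .. ▸ heq
      cases h1
      rw [if_pos hg]

theorem pvDecodeA_lit {c : Char} {r : List Char}
    (hs : pvLookupStep pvXmlLookups (c :: r) = (c :: r, none))
    (hg : (PySem.Chars.startswith (c :: r) ['&', '#'] && PySem.Chars.isIn [';'] (c :: r)) = false) :
    pvDecodeA (c :: r) = c :: pvDecodeA r := by
  rw [pvDecodeA.eq_def]
  split
  · rename_i heq
    exact absurd heq (List.cons_ne_nil _ _)
  · rename_i c2 r2 heq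
    injection heq with e1 e2
    subst e1; subst e2
    split
    · rename_i heq
      rw [hs] at heq
      obtain ⟨-, h2⟩ := Prod.mk.injEq .. ▸ heq
      cases h2
    · rename_i x1 heq
      rw [hs] at heq
      obtain ⟨h1, -⟩ := Prod.mk.injEq .. ▸ heq
      cases h1
      rw [if_neg (by simp [hg])]

theorem pvBexp_amp (r : List Char) : pvBexp ('&' :: r) = ((pvMySplit r).map pvDecodePart).flatten := by
  have h : pvMySplit ('&' :: r) = [] :: pvMySplit r := by simp [pvMySplit]
  unfold pvBexp
  rw [h]
  rfl

theorem pvBexp_head (cs : List Char) :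
    pvBexp cs = cs.takeWhile (fun c => c ≠ '&') ++ ((pvMySplit cs).tail.map pvDecodePart).flatten := by
  unfold pvBexp
  rw [pvMySplit_head cs]
  rfl

theorem pvEntity (suf : List Char) (ch : Char) (r : List Char)
    (hsuf : '&' ∉ suf)
    (hdp : pvDecodePart (r.takeWhile (fun c => c ≠ '&')) =
             ch :: (r.takeWhile (fun c => c ≠ '&')).drop suf.length)
    (hpre : List.isPrefixOf suf r = true)
    (hrec : pvDecodeA (r.drop suf.length) = pvBexp (r.drop suf.length)) :
    [ch] ++ pvDecodeA (r.drop suf.length) = pvBexp ('&' :: r) := by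
  obtain ⟨r', rfl⟩ : ∃ r', r = suf ++ r' := by
    obtain ⟨t, ht⟩ := List.isPrefixOf_iff_prefix.mp hpre
    exact ⟨t, ht.symm⟩
  have hall : ∀ a ∈ suf, (fun c => decide (c ≠ '&')) a = true := by
    intro a ha; simp; intro e; exact hsuf (e ▸ ha)
  have htw : (suf ++ r').takeWhile (fun c => c ≠ '&') =
      suf ++ r'.takeWhile (fun c => c ≠ '&') := List.takeWhile_append_of_pos hall
  have hdrop : (suf ++ r').drop suf.length = r' := by simp
  rw [hdrop] at hrec ⊢
  rw [pvBexp_amp, pvMySplit_append r' hsuf]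
  have hhd : (pvMySplit r').headD [] = r'.takeWhile (fun c => c ≠ '&') := by
    rw [pvMySplit_head r']; rfl
  simp only [List.map_cons, List.flatten_cons]
  rw [hhd, ← htw, hdp, hrec, pvBexp_head r', htw]
  simp

theorem pvNumeric (t : List Char) (n0 : Int)
    (hsem : ';' ∈ t)
    (hns : '&' ∉ t.takeWhile (fun c => c ≠ ';'))
    (hof : PySem.Int.ofChars? (t.takeWhile (fun c => c ≠ ';')) = some n0)
    (hrec : pvDecodeA ((t.dropWhile (fun c => c ≠ ';')).drop 1) =
            pvBexp ((t.dropWhile (fun c => c ≠ ';')).drop 1)) :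
    pvDecodeA ('&' :: '#' :: t) = pvBexp ('&' :: '#' :: t) := by
  have hs : pvLookupStep pvXmlLookups ('&' :: '#' :: t) = ('&' :: '#' :: t, none) := by
    rw [pvLookupStep_amp]; simp [List.isPrefixOf]
  have hg : (PySem.Chars.startswith ('&' :: '#' :: t) ['&', '#'] &&
      PySem.Chars.isIn [';'] ('&' :: '#' :: t)) = true := by
    have h1 : PySem.Chars.startswith ('&' :: '#' :: t) ['&', '#'] = true := by
      simp [PySem.Chars.startswith, List.isPrefixOf]
    have h2 : PySem.Chars.isIn [';'] ('&' :: '#' :: t) = true :=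
      (pvIsIn_singleton _ _).mpr (by simp [hsem])
    simp [h1, h2]
  rw [pvDecodeA_num hs hg]
  simp only [List.drop_succ_cons, List.drop_zero]
  rw [hof]
  set code := t.takeWhile (fun c => c ≠ ';') with hcode
  set u := (t.dropWhile (fun c => c ≠ ';')).drop 1 with hu
  have hteq : t = code ++ ';' :: u := pvSemiSplit t hsem
  have hcodeok : ∀ a ∈ code, (fun c => decide (c ≠ ';')) a = true := by
    intro a ha
    rw [hcode] at ha
    have := List.mem_takeWhile_imp (p := fun c => decide (c ≠ ';')) (l := t) (x := a) ha
    simpa using this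
  -- B side
  rw [pvBexp_amp]
  have hshape : ('#' :: t) = ('#' :: code ++ [';']) ++ u := by
    rw [hteq]; simp
  have hnoamp : '&' ∉ ('#' :: code ++ [';']) := by
    simp only [List.cons_append, List.mem_cons, List.mem_append, List.mem_singleton]
    push_neg
    refine ⟨by decide, fun h => ?_, by decide⟩
    exact hns (by simpa using h)
  rw [hshape, pvMySplit_append u hnoamp]
  have hhd : (pvMySplit u).headD [] = u.takeWhile (fun c => c ≠ '&') := by
    rw [pvMySplit_head u]; rfl
  rw [hhd]
  simp only [List.map_cons, List.flatten_cons]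
  -- evaluate pvDecodePart on '#' :: code ++ ';' :: w
  set w := u.takeWhile (fun c => c ≠ '&') with hw
  have harg : '#' :: code ++ [';'] ++ w = '#' :: (code ++ ';' :: w) := by simp
  rw [harg]
  have hdp : pvDecodePart ('#' :: (code ++ ';' :: w)) = pvChr n0 ++ w := by
    have hsfx : pvFindSuffix pvEntitySuffixes ('#' :: (code ++ ';' :: w)) = none := by
      rw [pvFindSuffix_eval]; simp [List.isPrefixOf]
    have hsw : PySem.Chars.startswith ('#' :: (code ++ ';' :: w)) ['#'] = true := by
      simp [PySem.Chars.startswith, List.isPrefixOf]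
    have hin : PySem.Chars.isIn [';'] ('#' :: (code ++ ';' :: w)) = true :=
      (pvIsIn_singleton _ _).mpr (by simp)
    have htk : (code ++ ';' :: w).takeWhile (fun ch => ch ≠ ';') = code := by
      rw [List.takeWhile_append_of_pos hcodeok]
      simp [List.takeWhile]
    have hdw : ((code ++ ';' :: w).dropWhile (fun ch => ch ≠ ';')).drop 1 = w := by
      rw [List.dropWhile_append_of_pos hcodeok]
      simp [List.dropWhile]
    unfold pvDecodePart
    rw [hsfx]
    simp only [List.drop_succ_cons, List.drop_zero, hsw, hin, Bool.and_self]
    simp only [if_true]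
    rw [htk, hdw, hof]
  rw [hdp, hrec, pvBexp_head]
  simp [hw, List.append_assoc]

theorem pvDropHelper : ∀ (a u : List Char) (ch : Char),
    (a ++ ch :: u).drop (a.length + 1) = u := by
  intro a u ch
  induction a with
  | nil => simp
  | cons x xs ihx => simpa using ihx

theorem pvLiteral (r : List Char)
    (hdp : pvDecodePart (r.takeWhile (fun c => c ≠ '&')) = '&' :: r.takeWhile (fun c => c ≠ '&'))
    (hrec : pvDecodeA r = pvBexp r) :
    '&' :: pvDecodeA r = pvBexp ('&' :: r) := by
  rw [pvBexp_amp, pvMySplit_head r]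
  simp only [List.map_cons, List.flatten_cons]
  rw [hdp, hrec, pvBexp_head r]
  simp

theorem pvMain : ∀ (n : Nat) (cs : List Char), cs.length ≤ n → pvPreL cs →
    pvDecodeA cs = pvBexp cs := by
  intro n
  induction n with
  | zero =>
      intro cs h _
      cases cs with
      | nil => rw [pvDecodeA.eq_def]; rfl
      | cons c r => simp at h
  | succ n ih =>
      intro cs hlen hpre
      cases cs with
      | nil => rw [pvDecodeA.eq_def]; rfl
      | cons c r =>
        have hlenr : r.length ≤ n := by simpa using hlen
        have hprer : pvPreL r := by
          have h1 := pvPreL_drop hpre 1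
          simpa using h1
        by_cases hc : c = '&'
        · subst hc
          have ihd : ∀ k : Nat, pvDecodeA (r.drop k) = pvBexp (r.drop k) := by
            intro k
            refine ih (r.drop k) ?_ (pvPreL_drop hprer k)
            rw [List.length_drop]
            omega
          by_cases h1 : List.isPrefixOf ['a','m','p',';'] r = true
          · have hs : pvLookupStep pvXmlLookups ('&' :: r) = (r.drop 4, some ['&']) := by
              rw [pvLookupStep_amp, if_pos h1]
            rw [pvDecodeA_some hs]
            have hdp : pvDecodePart (r.takeWhile (fun c => c ≠ '&')) =
                '&' :: (r.takeWhile (fun c => c ≠ '&')).drop 4 := by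
              unfold pvDecodePart
              rw [pvFindSuffix_eval,
                  pvPrefix_takeWhile_iff ['a','m','p',';'] r (by decide), if_pos h1]
            exact pvEntity ['a','m','p',';'] '&' r (by decide) hdp h1 (ihd 4)
          · by_cases h2 : List.isPrefixOf ['a','p','o','s',';'] r = true
            · have hs : pvLookupStep pvXmlLookups ('&' :: r) = (r.drop 5, some ['\'']) := by
                rw [pvLookupStep_amp, if_neg h1, if_pos h2]
              rw [pvDecodeA_some hs]
              have hdp : pvDecodePart (r.takeWhile (fun c => c ≠ '&')) =
                  '\'' :: (r.takeWhile (fun c => c ≠ '&')).drop 5 := by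
                unfold pvDecodePart
                rw [pvFindSuffix_eval,
                    pvPrefix_takeWhile_iff ['a','m','p',';'] r (by decide), if_neg h1,
                    pvPrefix_takeWhile_iff ['a','p','o','s',';'] r (by decide), if_pos h2]
              exact pvEntity ['a','p','o','s',';'] '\'' r (by decide) hdp h2 (ihd 5)
            · by_cases h3 : List.isPrefixOf ['q','u','o','t',';'] r = true
              · have hs : pvLookupStep pvXmlLookups ('&' :: r) = (r.drop 5, some ['"']) := by
                  rw [pvLookupStep_amp, if_neg h1, if_neg h2, if_pos h3]
                rw [pvDecodeA_some hs]
                have hdp : pvDecodePart (r.takeWhile (fun c => c ≠ '&')) =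
                    '"' :: (r.takeWhile (fun c => c ≠ '&')).drop 5 := by
                  unfold pvDecodePart
                  rw [pvFindSuffix_eval,
                      pvPrefix_takeWhile_iff ['a','m','p',';'] r (by decide), if_neg h1,
                      pvPrefix_takeWhile_iff ['a','p','o','s',';'] r (by decide), if_neg h2,
                      pvPrefix_takeWhile_iff ['q','u','o','t',';'] r (by decide), if_pos h3]
                exact pvEntity ['q','u','o','t',';'] '"' r (by decide) hdp h3 (ihd 5)
              · by_cases h4 : List.isPrefixOf ['l','t',';'] r = true
                · have hs : pvLookupStep pvXmlLookups ('&' :: r) = (r.drop 3, some ['<']) := by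
                    rw [pvLookupStep_amp, if_neg h1, if_neg h2, if_neg h3, if_pos h4]
                  rw [pvDecodeA_some hs]
                  have hdp : pvDecodePart (r.takeWhile (fun c => c ≠ '&')) =
                      '<' :: (r.takeWhile (fun c => c ≠ '&')).drop 3 := by
                    unfold pvDecodePart
                    rw [pvFindSuffix_eval,
                        pvPrefix_takeWhile_iff ['a','m','p',';'] r (by decide), if_neg h1,
                        pvPrefix_takeWhile_iff ['a','p','o','s',';'] r (by decide), if_neg h2,
                        pvPrefix_takeWhile_iff ['q','u','o','t',';'] r (by decide), if_neg h3,
                        pvPrefix_takeWhile_iff ['l','t',';'] r (by decide), if_pos h4]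
                  exact pvEntity ['l','t',';'] '<' r (by decide) hdp h4 (ihd 3)
                · by_cases h5 : List.isPrefixOf ['g','t',';'] r = true
                  · have hs : pvLookupStep pvXmlLookups ('&' :: r) = (r.drop 3, some ['>']) := by
                      rw [pvLookupStep_amp, if_neg h1, if_neg h2, if_neg h3, if_neg h4, if_pos h5]
                    rw [pvDecodeA_some hs]
                    have hdp : pvDecodePart (r.takeWhile (fun c => c ≠ '&')) =
                        '>' :: (r.takeWhile (fun c => c ≠ '&')).drop 3 := by
                      unfold pvDecodePart
                      rw [pvFindSuffix_eval,
                          pvPrefix_takeWhile_iff ['a','m','p',';'] r (by decide), if_neg h1,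
                          pvPrefix_takeWhile_iff ['a','p','o','s',';'] r (by decide), if_neg h2,
                          pvPrefix_takeWhile_iff ['q','u','o','t',';'] r (by decide), if_neg h3,
                          pvPrefix_takeWhile_iff ['l','t',';'] r (by decide), if_neg h4,
                          pvPrefix_takeWhile_iff ['g','t',';'] r (by decide), if_pos h5]
                    exact pvEntity ['g','t',';'] '>' r (by decide) hdp h5 (ihd 3)
                  · -- no entity matches
                    have hs : pvLookupStep pvXmlLookups ('&' :: r) = ('&' :: r, none) := by
                      rw [pvLookupStep_amp, if_neg h1, if_neg h2, if_neg h3, if_neg h4, if_neg h5]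
                    cases r with
                    | nil =>
                        have hg : (PySem.Chars.startswith ['&'] ['&', '#'] &&
                            PySem.Chars.isIn [';'] ['&']) = false := by decide
                        rw [pvDecodeA_lit hs hg]
                        have hnil : pvDecodeA [] = [] := by rw [pvDecodeA.eq_def]
                        rw [hnil]
                        decide
                    | cons c1 t =>
                      by_cases hc1 : c1 = '#'
                      · subst hc1
                        by_cases hsem : ';' ∈ t
                        · -- the numeric branch; Pre_ supplies a well-formed code
                          have hpre0 := hpre 0
                          simp only [List.drop_zero] at hpre0
                          have hct : t.contains ';' = true := List.contains_iff_mem.mpr hsem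
                          have hpre0' : (!(t.takeWhile (fun ch => ch ≠ ';')).contains '&' &&
                              pvCodeOK (t.takeWhile (fun ch => ch ≠ ';'))) = true := by
                            have : pvPreAt ('&' :: '#' :: t) =
                                (!t.contains ';' ||
                                  (!(t.takeWhile (fun ch => ch ≠ ';')).contains '&' &&
                                    pvCodeOK (t.takeWhile (fun ch => ch ≠ ';')))) := rfl
                            rw [this, hct] at hpre0
                            simpa using hpre0
                          obtain ⟨hnsb, hokb⟩ := Bool.and_eq_true .. ▸ hpre0'
                          have hns : '&' ∉ t.takeWhile (fun c => c ≠ ';') := by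
                            intro hmem
                            rw [List.contains_iff_mem.mpr hmem] at hnsb
                            simp at hnsb
                          obtain ⟨n0, hof⟩ : ∃ n0,
                              PySem.Int.ofChars? (t.takeWhile (fun c => c ≠ ';')) = some n0 := by
                            unfold pvCodeOK at hokb
                            cases hh : PySem.Int.ofChars? (t.takeWhile (fun c => c ≠ ';')) with
                            | none => rw [hh] at hokb; simp at hokb
                            | some m => exact ⟨m, rfl⟩
                          refine pvNumeric t n0 hsem hns hof ?_
                          have hteq := pvSemiSplit t hsem
                          have hueq : ('#' :: t).drop ((t.takeWhile (fun c => c ≠ ';')).length + 2) =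
                              (t.dropWhile (fun c => c ≠ ';')).drop 1 := by
                            rw [List.drop_succ_cons]
                            have hh := pvDropHelper (t.takeWhile (fun c => c ≠ ';'))
                              ((t.dropWhile (fun c => c ≠ ';')).drop 1) ';'
                            rw [← hteq] at hh
                            exact hh
                          have h := ihd ((t.takeWhile (fun c => c ≠ ';')).length + 2)
                          rw [hueq] at h
                          exact h
                        · -- '#' but no ';' anywhere: literal '&'
                          have h2f : PySem.Chars.isIn [';'] ('&' :: '#' :: t) = false := by
                            cases hb : PySem.Chars.isIn [';'] ('&' :: '#' :: t) with
                            | false => rfl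
                            | true =>
                                have := (pvIsIn_singleton _ _).mp hb
                                simp at this
                                exact absurd this hsem
                          have hg : (PySem.Chars.startswith ('&' :: '#' :: t) ['&', '#'] &&
                              PySem.Chars.isIn [';'] ('&' :: '#' :: t)) = false := by
                            rw [h2f]; simp
                          rw [pvDecodeA_lit hs hg]
                          have htk : ('#' :: t).takeWhile (fun c => c ≠ '&') =
                              '#' :: t.takeWhile (fun c => c ≠ '&') := by
                            simp [List.takeWhile]
                          have hdp : pvDecodePart (('#' :: t).takeWhile (fun c => c ≠ '&')) =
                              '&' :: ('#' :: t).takeWhile (fun c => c ≠ '&') := by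
                            rw [htk]
                            unfold pvDecodePart
                            rw [pvFindSuffix_eval]
                            simp only [List.isPrefixOf]
                            simp only [Bool.and_eq_true, decide_eq_true_eq]
                            simp
                            intro _ hbad
                            have hm := (pvIsIn_singleton _ _).mp hbad
                            simp at hm
                            exact absurd (List.takeWhile_subset _ (by simpa using hm)) hsem
                          exact pvLiteral ('#' :: t) hdp (ih ('#' :: t) hlenr hprer)
                      · -- head of r is neither '#' nor the start of an entity
                        have hswf : PySem.Chars.startswith ('&' :: c1 :: t) ['&', '#'] = false := by
                          simp [PySem.Chars.startswith, List.isPrefixOf, Ne.symm hc1]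
                        have hg : (PySem.Chars.startswith ('&' :: c1 :: t) ['&', '#'] &&
                            PySem.Chars.isIn [';'] ('&' :: c1 :: t)) = false := by
                          rw [hswf]; simp
                        rw [pvDecodeA_lit hs hg]
                        have hdp : pvDecodePart ((c1 :: t).takeWhile (fun c => c ≠ '&')) =
                            '&' :: (c1 :: t).takeWhile (fun c => c ≠ '&') := by
                          by_cases hca : c1 = '&'
                          · subst hca
                            have htk : ('&' :: t).takeWhile (fun c => c ≠ '&') = ([] : List Char) := by
                              simp [List.takeWhile]
                            rw [htk]
                            decide
                          · have htk : (c1 :: t).takeWhile (fun c => c ≠ '&') =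
                                c1 :: t.takeWhile (fun c => c ≠ '&') := by
                              simp [List.takeWhile, hca]
                            unfold pvDecodePart
                            rw [pvFindSuffix_eval,
                                pvPrefix_takeWhile_iff ['a','m','p',';'] (c1 :: t) (by decide), if_neg h1,
                                pvPrefix_takeWhile_iff ['a','p','o','s',';'] (c1 :: t) (by decide), if_neg h2,
                                pvPrefix_takeWhile_iff ['q','u','o','t',';'] (c1 :: t) (by decide), if_neg h3,
                                pvPrefix_takeWhile_iff ['l','t',';'] (c1 :: t) (by decide), if_neg h4,
                                pvPrefix_takeWhile_iff ['g','t',';'] (c1 :: t) (by decide), if_neg h5]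
                            simp
                            intro hbad _
                            simp [List.takeWhile, hca, PySem.Chars.startswith,
                              List.isPrefixOf] at hbad
                            exact absurd hbad.symm hc1
                        exact pvLiteral (c1 :: t) hdp (ih (c1 :: t) hlenr hprer)
        · -- head is not '&': one literal character
          have hs : pvLookupStep pvXmlLookups (c :: r) = (c :: r, none) := by
            simp [pvLookupStep, pvXmlLookups, PySem.Chars.startswith, List.isPrefixOf, Ne.symm hc]
          have hg : (PySem.Chars.startswith (c :: r) ['&', '#'] &&
              PySem.Chars.isIn [';'] (c :: r)) = false := by
            have : PySem.Chars.startswith (c :: r) ['&', '#'] = false := by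
              simp [PySem.Chars.startswith, List.isPrefixOf, Ne.symm hc]
            rw [this]; simp
          rw [pvDecodeA_lit hs hg, ih r hlenr hprer]
          obtain ⟨p, ps, hm⟩ := pvMySplit_cons_shape r
          have hsp : pvMySplit (c :: r) = (c :: p) :: ps := by
            simp [pvMySplit, hc, hm]
          unfold pvBexp
          rw [hm, hsp]
          rfl

theorem pvJoin_nil (ps : List (List Char)) : PySem.Chars.join [] ps = ps.flatten := by
  simp only [PySem.Chars.join, List.intercalate]
  induction ps with
  | nil => rfl
  | cons p pp ih => cases pp <;> simp_all

-- ===== VERDICT (by name: the statement is the Claim_ definition above) =====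
theorem xml_decode_for_info_spec : Claim_equal_xml_decode_for_info := by
  intro x _ hpre
  unfold Spec_xml_decode_for_info
  unfold xml_decode_for_info xml_decode_for_info_alt
  have hpl : pvPreL x.toList := by
    intro i
    by_cases hi : i < x.toList.length
    · exact hpre i (List.mem_range.mpr hi)
    · rw [List.drop_eq_nil_of_le (by omega)]
      decide
  have h := pvMain x.toList.length x.toList le_rfl hpl
  rw [pvSplitOn_eq, pvMySplit_head x.toList]
  show String.mk (pvDecodeA x.toList) =
    String.mk ((x.toList.takeWhile (fun c => c ≠ '&')) ++
      PySem.Chars.join [] ((pvMySplit x.toList).tail.map pvDecodePart))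
  rw [pvJoin_nil, h, pvBexp_head]
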